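-- pv_equiv track=rewrite | github.com/sapkotaruz11/EDGE | src/gnn_explainers/trainer.py | get_lp_aifb_fid
-- ===== SOURCE A (Python) =====
-- def get_lp_aifb_fid(gnn_pred_dt_train, gnn_pred_dt_test, idx_map):
--     # function tro create learning problems for the Mutag dataset for fidelity evaluations based on GNN model predictions.
--     train_positive_examples = [
--         idx_map[item]["IRI"]
--         for item in gnn_pred_dt_train
--         if gnn_pred_dt_train[item] == 0
--     ]
--     train_negative_examples = [
--         idx_map[item]["IRI"]
--         for item in gnn_pred_dt_train
--         if gnn_pred_dt_train[item] == 1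
--     ]
--
--     # Positive and negative examples for test set
--     test_positive_examples = [
--         idx_map[item]["IRI"] for item in gnn_pred_dt_test if gnn_pred_dt_test[item] == 0
--     ]
--     test_negative_examples = [
--         idx_map[item]["IRI"] for item in gnn_pred_dt_test if gnn_pred_dt_test[item] == 1
--     ]
--     assert (
--         len(set(train_positive_examples).intersection(set(train_negative_examples)))
--         == 0
--     )
--
--     lp_dict_test_train = {
--         "id1instance": {
--             "positive_examples_train": train_positive_examples,
--             "negative_examples_train": train_negative_examples,
--             "positive_examples_test": test_positive_examples,
--             "negative_examples_test": test_negative_examples,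
--         }
--     }
--     return lp_dict_test_train
-- ===== SOURCE B (Python) =====
-- def get_lp_aifb_fid(gnn_pred_dt_train, gnn_pred_dt_test, idx_map):
--     # Build ONE group-by index over both prediction dicts, keyed by
--     # (label, split); the four example lists are then just projections
--     # of the index, instead of four independent filter scans.
--     groups = {}
--     for split, preds in (("train", gnn_pred_dt_train), ("test", gnn_pred_dt_test)):
--         for key, label in preds.items():
--             groups.setdefault((label, split), []).append(key)
--
--     def iris(label, split):
--         return [idx_map[k]["IRI"] for k in groups.get((label, split), [])]
--
--     train_positive = iris(0, "train")
--     train_negative = iris(1, "train")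
--
--     assert set(train_positive).isdisjoint(train_negative)
--
--     return {
--         "id1instance": {
--             "positive_examples_train": train_positive,
--             "negative_examples_train": train_negative,
--             "positive_examples_test": iris(0, "test"),
--             "negative_examples_test": iris(1, "test"),
--         }
--     }
-- ===== Notes on version B (the rewrite author's own statement) =====
-- stated objective: alternative
-- what changed: B builds a single group-by index keyed by (label, split) over both prediction dicts and reads the four example lists off it as projections, instead of A's four independent filter-comprehension scans.
import Mathlib
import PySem

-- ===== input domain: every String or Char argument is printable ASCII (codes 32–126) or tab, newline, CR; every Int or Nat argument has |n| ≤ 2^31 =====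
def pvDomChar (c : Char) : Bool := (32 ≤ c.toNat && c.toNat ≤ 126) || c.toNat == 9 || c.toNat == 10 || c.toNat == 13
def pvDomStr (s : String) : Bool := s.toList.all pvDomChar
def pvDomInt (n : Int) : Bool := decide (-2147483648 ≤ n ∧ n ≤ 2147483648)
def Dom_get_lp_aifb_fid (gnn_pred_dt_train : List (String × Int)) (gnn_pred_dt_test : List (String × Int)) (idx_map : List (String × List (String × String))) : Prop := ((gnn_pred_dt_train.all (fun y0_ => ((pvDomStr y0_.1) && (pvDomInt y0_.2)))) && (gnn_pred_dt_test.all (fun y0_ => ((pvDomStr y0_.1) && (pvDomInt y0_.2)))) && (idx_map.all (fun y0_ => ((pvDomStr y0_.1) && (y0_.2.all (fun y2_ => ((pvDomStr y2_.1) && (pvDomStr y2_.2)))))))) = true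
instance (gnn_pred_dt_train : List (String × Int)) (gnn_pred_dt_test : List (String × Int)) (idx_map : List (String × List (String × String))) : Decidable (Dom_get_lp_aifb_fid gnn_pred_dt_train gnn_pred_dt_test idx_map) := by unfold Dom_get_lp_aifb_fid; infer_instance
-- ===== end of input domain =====

-- B replaces A's four filter-comprehensions by ONE (label, split)-keyed group-by index built
-- over both prediction dicts; the four lists are projections of that index (same cost).

-- shared transliteration of the expression `idx_map[item]["IRI"]` appearing verbatim in both
-- Pythons; the defaults are only reachable where Python raises KeyError, excluded by Pre_.
def pvIri (idx_map : List (String × List (String × String))) (k : String) : String :=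
  (PySem.Dict.ofList ((PySem.Dict.ofList idx_map).getD k [])).getD "IRI" ""

-- ===== PORT A =====
-- the failing `assert` is not representable as a value: inputs on which it fires are excluded by Pre_.
def get_lp_aifb_fid (gnn_pred_dt_train : List (String × Int)) (gnn_pred_dt_test : List (String × Int)) (idx_map : List (String × List (String × String))) : List (String × List (String × List String)) :=
  let dtr := PySem.Dict.ofList gnn_pred_dt_train
  let dte := PySem.Dict.ofList gnn_pred_dt_test
  let train_positive_examples := (dtr.keys.filter (fun item => dtr.getD item 0 == 0)).map (pvIri idx_map)
  let train_negative_examples := (dtr.keys.filter (fun item => dtr.getD item 0 == 1)).map (pvIri idx_map)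
  let test_positive_examples := (dte.keys.filter (fun item => dte.getD item 0 == 0)).map (pvIri idx_map)
  let test_negative_examples := (dte.keys.filter (fun item => dte.getD item 0 == 1)).map (pvIri idx_map)
  [("id1instance",
    [("positive_examples_train", train_positive_examples),
     ("negative_examples_train", train_negative_examples),
     ("positive_examples_test", test_positive_examples),
     ("negative_examples_test", test_negative_examples)])]

-- ===== PORT B =====
-- `groups.setdefault((label, split), []).append(key)` is exactly `modify (label, split) [] (· ++ [key])`.
def get_lp_aifb_fid_alt (gnn_pred_dt_train : List (String × Int)) (gnn_pred_dt_test : List (String × Int)) (idx_map : List (String × List (String × String))) : List (String × List (String × List String)) :=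
  let groups :=
    [("train", gnn_pred_dt_train), ("test", gnn_pred_dt_test)].foldl
      (fun g sp =>
        (PySem.Dict.ofList sp.2).items.foldl
          (fun g p => g.modify (p.2, sp.1) [] (· ++ [p.1])) g)
      (PySem.Dict.empty)
  let iris := fun (label : Int) (split : String) =>
    (groups.getD (label, split) []).map (pvIri idx_map)
  let train_positive := iris 0 "train"
  let train_negative := iris 1 "train"
  [("id1instance",
    [("positive_examples_train", train_positive),
     ("negative_examples_train", train_negative),
     ("positive_examples_test", iris 0 "test"),
     ("negative_examples_test", iris 1 "test")])]

-- ===== PRECONDITION & SPEC =====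
-- Pre_ excludes exactly the inputs where Python A raises: a KeyError (a key with prediction 0 or 1
-- missing from idx_map or whose entry lacks "IRI"), or the assert firing (a 0-key and a 1-key of the
-- train dict sharing an IRI).
def pvIriOk (idx_map : List (String × List (String × String))) (d : PySem.Dict String Int) : Prop :=
  ∀ p ∈ d.items, (p.2 = 0 ∨ p.2 = 1) →
    (((PySem.Dict.ofList idx_map).get? p.1).bind
      (fun m => (PySem.Dict.ofList m).get? "IRI")).isSome = true

def Pre_get_lp_aifb_fid (gnn_pred_dt_train : List (String × Int)) (gnn_pred_dt_test : List (String × Int)) (idx_map : List (String × List (String × String))) : Prop :=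
  pvIriOk idx_map (PySem.Dict.ofList gnn_pred_dt_train) ∧
  pvIriOk idx_map (PySem.Dict.ofList gnn_pred_dt_test) ∧
  (∀ p ∈ (PySem.Dict.ofList gnn_pred_dt_train).items,
   ∀ q ∈ (PySem.Dict.ofList gnn_pred_dt_train).items,
     p.2 = 0 → q.2 = 1 → pvIri idx_map p.1 ≠ pvIri idx_map q.1)

instance (gnn_pred_dt_train : List (String × Int)) (gnn_pred_dt_test : List (String × Int)) (idx_map : List (String × List (String × String))) : Decidable (Pre_get_lp_aifb_fid gnn_pred_dt_train gnn_pred_dt_test idx_map) := by unfold Pre_get_lp_aifb_fid; unfold pvIriOk; infer_instance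

def pvWitness_get_lp_aifb_fid : (List (String × Int)) × (List (String × Int)) × (List (String × List (String × String))) :=
  ([("a", 0), ("b", 1)], [("a", 0)], [("a", [("IRI", "http://a")]), ("b", [("IRI", "http://b")])])

def Spec_get_lp_aifb_fid (gnn_pred_dt_train : List (String × Int)) (gnn_pred_dt_test : List (String × Int)) (idx_map : List (String × List (String × String))) (out : List (String × List (String × List String))) : Prop := out = get_lp_aifb_fid_alt gnn_pred_dt_train gnn_pred_dt_test idx_map
instance (gnn_pred_dt_train : List (String × Int)) (gnn_pred_dt_test : List (String × Int)) (idx_map : List (String × List (String × String))) (out : List (String × List (String × List String))) : Decidable (Spec_get_lp_aifb_fid gnn_pred_dt_train gnn_pred_dt_test idx_map out) := by unfold Spec_get_lp_aifb_fid; infer_instance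

-- ===== CLAIM (what is proved, stated in full; the proofs are below) =====
def Claim_equal_get_lp_aifb_fid : Prop := ∀ (gnn_pred_dt_train : List (String × Int)) (gnn_pred_dt_test : List (String × Int)) (idx_map : List (String × List (String × String))), Dom_get_lp_aifb_fid gnn_pred_dt_train gnn_pred_dt_test idx_map → Pre_get_lp_aifb_fid gnn_pred_dt_train gnn_pred_dt_test idx_map → Spec_get_lp_aifb_fid gnn_pred_dt_train gnn_pred_dt_test idx_map (get_lp_aifb_fid gnn_pred_dt_train gnn_pred_dt_test idx_map)

-- ===== LEMMAS AND PROOFS =====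

-- the inner grouping fold of B, characterised per index entry
lemma getD_group (split : String) (l : List (String × Int))
    (g : PySem.Dict (Int × String) (List String)) (c : Int × String) :
    (l.foldl (fun g p => g.modify (p.2, split) [] (· ++ [p.1])) g).getD c []
    = g.getD c [] ++
      (if c.2 = split then (l.filter (fun p => p.2 == c.1)).map (·.1) else []) := by
  rw [show l.foldl (fun g p => g.modify (p.2, split) [] (· ++ [p.1])) g
      = (l.map (fun p : String × Int => ((p.2, split), p.1))).foldl
          (fun (g : PySem.Dict (Int × String) (List String)) q => g.modify q.1 [] (· ++ [q.2])) g
    from (List.foldl_map (f := fun p : String × Int => ((p.2, split), p.1))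
        (g := fun (g : PySem.Dict (Int × String) (List String)) q => g.modify q.1 [] (· ++ [q.2]))
        (l := l) (init := g)).symm]
  rw [PySem.Dict.getD_foldl_modify_append]
  congr 1
  rw [List.filter_map, List.map_map]
  by_cases h : c.2 = split
  · simp only [if_pos h]
    obtain ⟨c1, c2⟩ := c
    subst h
    congr 1
    apply List.filter_congr
    intro p _
    simp [Function.comp, Prod.ext_iff, and_comm]
  · simp only [if_neg h]
    obtain ⟨c1, c2⟩ := c
    rw [List.map_eq_nil_iff, List.filter_eq_nil_iff]
    intro p _
    simp only [Function.comp, beq_iff_eq, Prod.mk.injEq]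
    rintro ⟨-, rfl⟩
    exact h rfl

-- A's keys-based filter+map equals the items-based filter+map (dict keys are Nodup).
lemma keys_filter_map_eq (idx_map : List (String × List (String × String)))
    (d : PySem.Dict String Int) (hnd : d.keys.Nodup) (v : Int) :
    (d.keys.filter (fun item => d.getD item 0 == v)).map (pvIri idx_map)
    = (d.items.filter (fun p => p.2 == v)).map (fun p => pvIri idx_map p.1) := by
  have hkeys : d.keys = d.items.map (·.1) := rfl
  rw [hkeys, List.filter_map, List.map_map]
  congr 1
  apply List.filter_congr
  intro p hp
  have := PySem.Dict.getD_of_mem_items (d := d) (k := p.1) (v := p.2)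
    (by simpa using hp) hnd (d0 := 0)
  simp [this]

theorem get_lp_aifb_fid_spec_aux (gnn_pred_dt_train : List (String × Int)) (gnn_pred_dt_test : List (String × Int)) (idx_map : List (String × List (String × String))) :
    get_lp_aifb_fid gnn_pred_dt_train gnn_pred_dt_test idx_map
    = get_lp_aifb_fid_alt gnn_pred_dt_train gnn_pred_dt_test idx_map := by
  unfold get_lp_aifb_fid get_lp_aifb_fid_alt
  simp only [List.foldl_cons, List.foldl_nil]
  rw [getD_group, getD_group, getD_group, getD_group,
      getD_group, getD_group, getD_group, getD_group]
  simp [keys_filter_map_eq _ _ (PySem.Dict.nodup_keys_ofList _)]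

-- ===== VERDICT (by name: the statement is the Claim_ definition above) =====
theorem get_lp_aifb_fid_spec : Claim_equal_get_lp_aifb_fid := by
  intro tr te idx _ _
  exact get_lp_aifb_fid_spec_aux tr te idx
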